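-- pv_equiv track=rewrite | github.com/wilmurillo-ai/Design-Assistant | .skills/openclaw-skills/skills/johnnywang2001/jrv-gitignore-gen/scripts/gitignore_gen.py | find_template
-- ===== SOURCE A (Python) =====
-- def find_template(query, templates):
--     """Find the best matching template name (case-insensitive)."""
--     query_lower = query.lower()
--     # Exact match
--     for t in templates:
--         if t.lower() == query_lower:
--             return t
--     # Starts with
--     for t in templates:
--         if t.lower().startswith(query_lower):
--             return t
--     # Contains
--     for t in templates:
--         if query_lower in t.lower():
--             return t
--     return None
-- ===== SOURCE B (Python) =====
-- def find_template(query, templates):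
--     """Find the best matching template name (case-insensitive), in one pass."""
--     q = query.lower()
--     pref = None
--     sub = None
--     for t in templates:
--         tl = t.lower()
--         if tl == q:
--             return t
--         if pref is None and tl.startswith(q):
--             pref = t
--         if sub is None and q in tl:
--             sub = t
--     return pref if pref is not None else sub
-- ===== Notes on version B (the rewrite author's own statement) =====
-- stated objective: simpler
-- what changed: Replaced A's three sequential scans over templates by one single pass that lowercases each template once, returns immediately on an exact match, and records the first prefix and first substring candidates, preferring prefix over substring at the end.
import Mathlib
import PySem

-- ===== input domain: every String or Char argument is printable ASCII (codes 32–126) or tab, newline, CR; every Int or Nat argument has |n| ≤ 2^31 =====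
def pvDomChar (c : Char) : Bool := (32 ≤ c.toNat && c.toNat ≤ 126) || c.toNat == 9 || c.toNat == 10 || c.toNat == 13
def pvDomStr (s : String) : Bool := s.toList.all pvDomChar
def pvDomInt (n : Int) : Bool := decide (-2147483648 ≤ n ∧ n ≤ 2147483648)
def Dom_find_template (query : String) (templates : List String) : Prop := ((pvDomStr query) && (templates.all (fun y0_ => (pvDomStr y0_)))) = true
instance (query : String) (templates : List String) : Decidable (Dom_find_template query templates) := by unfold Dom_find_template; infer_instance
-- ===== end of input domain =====

-- B is a single pass that lowercases each template once and records first prefix/substring candidates; same result, one scan instead of three.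

-- ===== PORT A =====
-- first Python loop: exact match
def ftLoopExact (ql : String) : List String → Option String
  | [] => none
  | t :: ts => if PySem.Str.lower t == ql then some t else ftLoopExact ql ts

-- second Python loop: startswith
def ftLoopPref (ql : String) : List String → Option String
  | [] => none
  | t :: ts => if PySem.Str.startswith (PySem.Str.lower t) ql then some t else ftLoopPref ql ts

-- third Python loop: contains
def ftLoopSub (ql : String) : List String → Option String
  | [] => none
  | t :: ts => if PySem.Str.isIn ql (PySem.Str.lower t) then some t else ftLoopSub ql ts

def find_template (query : String) (templates : List String) : Option String :=
  let ql := PySem.Str.lower query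
  match ftLoopExact ql templates with
  | some t => some t
  | none =>
    match ftLoopPref ql templates with
    | some t => some t
    | none => ftLoopSub ql templates

-- ===== PORT B =====
def ftAltLoop (ql : String) : List String → Option String → Option String → Option String
  | [], pref, sub => match pref with | some t => some t | none => sub
  | t :: ts, pref, sub =>
    let tl := PySem.Str.lower t
    if tl == ql then some t
    else
      let pref' := if pref.isNone && PySem.Str.startswith tl ql then some t else pref
      let sub' := if sub.isNone && PySem.Str.isIn ql tl then some t else sub
      ftAltLoop ql ts pref' sub'

def find_template_alt (query : String) (templates : List String) : Option String :=
  ftAltLoop (PySem.Str.lower query) templates none none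

-- ===== PRECONDITION & SPEC =====
def Spec_find_template (query : String) (templates : List String) (out : Option String) : Prop := out = find_template_alt query templates
instance (query : String) (templates : List String) (out : Option String) : Decidable (Spec_find_template query templates out) := by unfold Spec_find_template; infer_instance

-- ===== CLAIM (what is proved, stated in full; the proofs are below) =====
def Claim_equal_find_template : Prop := ∀ (query : String) (templates : List String), Dom_find_template query templates → Spec_find_template query templates (find_template query templates)

-- ===== LEMMAS AND PROOFS =====
theorem ftAltLoop_eq (ql : String) (ts : List String) :
    ∀ (pref sub : Option String),
    ftAltLoop ql ts pref sub =
      match ftLoopExact ql ts with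
      | some t => some t
      | none =>
        match (match pref with | some p => some p | none => ftLoopPref ql ts) with
        | some t => some t
        | none => match sub with | some s => some s | none => ftLoopSub ql ts := by
  induction ts with
  | nil =>
    intro pref sub
    cases pref <;> cases sub <;> simp [ftAltLoop, ftLoopExact, ftLoopPref, ftLoopSub]
  | cons t ts ih =>
    intro pref sub
    simp only [ftAltLoop, ftLoopExact, ftLoopPref, ftLoopSub]
    by_cases hx : (PySem.Str.lower t == ql) = true
    · simp [hx]
    · simp only [hx, ih]
      cases pref <;> cases sub <;>
        by_cases hp : (PySem.Chars.startswith (PySem.Chars.lower t.toList) ql.toList) = true <;>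
        by_cases hs : (PySem.Chars.isIn ql.toList (PySem.Chars.lower t.toList)) = true <;>
        simp [PySem.Str.startswith, PySem.Str.isIn, hp, hs]

-- ===== VERDICT (by name: the statement is the Claim_ definition above) =====
theorem find_template_spec : Claim_equal_find_template := by
  intro query templates _
  unfold Spec_find_template find_template find_template_alt
  rw [ftAltLoop_eq]
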